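-- pv_equiv track=rewrite | github.com/yube2222/MachineLearning | TED_talks_ML1/.ipynb_checkpoints/utils-checkpoint.py | get_dict_subplots
-- ===== SOURCE A (Python) =====
-- def get_dict_subplots(nrows, ncols):
--     '''
--     Function to assing the subplot coordinates to subplot number
--     :param nrows: number of figure subplots rows
--     :param ncols: number of figure subplots columns
--     '''
--     i = 0
--     dict_out = {}
--     for row in range(nrows):
--         for col in range(ncols):
--             dict_out[i] = [row, col]
--             i += 1
--
--     return dict_out
-- ===== SOURCE B (Python) =====
-- def get_dict_subplots(nrows, ncols):
--     '''
--     Function to assing the subplot coordinates to subplot number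
--     :param nrows: number of figure subplots rows
--     :param ncols: number of figure subplots columns
--     '''
--     if nrows <= 0 or ncols <= 0:
--         return {}
--     return {i: [i // ncols, i % ncols] for i in range(nrows * ncols)}
-- ===== Notes on version B (the rewrite author's own statement) =====
-- stated objective: simpler
-- what changed: Replaces the nested row/col loops with a running counter by a single dict comprehension over range(nrows*ncols) that computes each coordinate pair in closed form as (i // ncols, i % ncols).
import Mathlib
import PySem

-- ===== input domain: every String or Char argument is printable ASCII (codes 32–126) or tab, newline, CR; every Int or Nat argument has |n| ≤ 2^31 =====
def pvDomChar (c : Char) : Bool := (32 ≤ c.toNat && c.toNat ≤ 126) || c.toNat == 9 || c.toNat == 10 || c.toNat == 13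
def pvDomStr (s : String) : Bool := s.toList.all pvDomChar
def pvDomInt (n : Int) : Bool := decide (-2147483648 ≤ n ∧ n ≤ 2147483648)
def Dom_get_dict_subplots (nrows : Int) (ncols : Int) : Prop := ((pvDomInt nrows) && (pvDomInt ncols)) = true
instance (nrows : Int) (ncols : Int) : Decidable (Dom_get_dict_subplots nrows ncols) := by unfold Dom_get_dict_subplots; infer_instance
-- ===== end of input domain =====

-- B replaces A's nested row/col loops with a running counter by one flat loop over
-- range(nrows*ncols) computing each coordinate pair in closed form by divmod (objective: simpler).

-- ===== PORT A =====
-- i = 0; dict_out = {}; for row in range(nrows): for col in range(ncols): dict_out[i] = [row, col]; i += 1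
def get_dict_subplots (nrows : Int) (ncols : Int) : List (Int × List Int) :=
  let st :=
    (PySem.List.pyRange 0 nrows 1).foldl
      (fun (st : Int × PySem.Dict Int (List Int)) row =>
        (PySem.List.pyRange 0 ncols 1).foldl
          (fun st col => (st.1 + 1, st.2.insert st.1 [row, col])) st)
      (0, PySem.Dict.empty)
  st.2.items

-- ===== PORT B =====
-- if nrows <= 0 or ncols <= 0: return {}; return {i: [i // ncols, i % ncols] for i in range(nrows*ncols)}
def get_dict_subplots_alt (nrows : Int) (ncols : Int) : List (Int × List Int) :=
  if nrows ≤ 0 ∨ ncols ≤ 0 then []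
  else
    ((PySem.List.pyRange 0 (nrows * ncols) 1).foldl
      (fun (d : PySem.Dict Int (List Int)) i =>
        d.insert i [PySem.Int.floordiv i ncols, PySem.Int.mod i ncols])
      PySem.Dict.empty).items

-- ===== PRECONDITION & SPEC =====
def Spec_get_dict_subplots (nrows : Int) (ncols : Int) (out : List (Int × List Int)) : Prop := out = get_dict_subplots_alt nrows ncols
instance (nrows : Int) (ncols : Int) (out : List (Int × List Int)) : Decidable (Spec_get_dict_subplots nrows ncols out) := by unfold Spec_get_dict_subplots; infer_instance

-- ===== CLAIM (what is proved, stated in full; the proofs are below) =====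
def Claim_equal_get_dict_subplots : Prop := ∀ (nrows : Int) (ncols : Int), Dom_get_dict_subplots nrows ncols → Spec_get_dict_subplots nrows ncols (get_dict_subplots nrows ncols)

-- ===== LEMMAS AND PROOFS =====

theorem foldl_id {α β : Type} (l : List β) (init : α) :
    l.foldl (fun st _ => st) init = init := by
  induction l with
  | nil => rfl
  | cons x xs ih => simp [ih]

-- A's inner column loop: starting from counter i and dict d whose keys are all < i,
-- it advances the counter by c and appends the pairs (i+col, [row, col]).
theorem innerA (row i : Int) (d : PySem.Dict Int (List Int))
    (hd : ∀ k : Int, i ≤ k → d.contains k = false) (c : Nat) :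
    ((PySem.List.pyRange 0 (c : Int) 1).foldl
        (fun (st : Int × PySem.Dict Int (List Int)) col =>
          (st.1 + 1, st.2.insert st.1 [row, col])) (i, d)).1 = i + c ∧
    ((PySem.List.pyRange 0 (c : Int) 1).foldl
        (fun (st : Int × PySem.Dict Int (List Int)) col =>
          (st.1 + 1, st.2.insert st.1 [row, col])) (i, d)).2.items =
      d.items ++ (PySem.List.pyRange 0 (c : Int) 1).map (fun col => (i + col, [row, col])) ∧
    (∀ k : Int, i + c ≤ k →
      ((PySem.List.pyRange 0 (c : Int) 1).foldl
        (fun (st : Int × PySem.Dict Int (List Int)) col =>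
          (st.1 + 1, st.2.insert st.1 [row, col])) (i, d)).2.contains k = false) := by
  induction c with
  | zero =>
    simp [PySem.List.pyRange_one_eq_nil (by omega : (0:Int) ≥ 0)]
    exact fun k hk => hd k (by omega)
  | succ c ih =>
    have hsplit : PySem.List.pyRange 0 ((c : Int) + 1) 1 =
        PySem.List.pyRange 0 (c : Int) 1 ++ [(c : Int)] :=
      PySem.List.pyRange_one_succ_right (by omega)
    obtain ⟨h1, h2, h3⟩ := ih
    have hc : ((c : Nat) + 1 : Nat) = ((c : Int) + 1).toNat := by omega
    push_cast
    rw [hsplit, List.foldl_append]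
    refine ⟨by simp [h1]; ring, ?_, ?_⟩
    · simp only [List.foldl_cons, List.foldl_nil, h1]
      rw [PySem.Dict.items_insert_of_not_contains _ _ (h3 (i + c) (by omega))]
      rw [h2]
      simp
    · intro k hk
      simp only [List.foldl_cons, List.foldl_nil, h1]
      rw [PySem.Dict.contains_insert]
      have : (k == i + (c : Int)) = false := by simp; omega
      rw [this, h3 k (by omega)]
      rfl

-- A's outer row loop, for 0 < ncols: after n rows the counter is n*ncols and the dict's
-- items are exactly B's closed-form pairs for indices 0 .. n*ncols - 1.
theorem outerA (ncols : Int) (hc : 0 < ncols) (n : Nat) :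
    ((PySem.List.pyRange 0 (n : Int) 1).foldl
        (fun (st : Int × PySem.Dict Int (List Int)) row =>
          (PySem.List.pyRange 0 ncols 1).foldl
            (fun st col => (st.1 + 1, st.2.insert st.1 [row, col])) st)
        (0, PySem.Dict.empty)).1 = (n : Int) * ncols ∧
    ((PySem.List.pyRange 0 (n : Int) 1).foldl
        (fun (st : Int × PySem.Dict Int (List Int)) row =>
          (PySem.List.pyRange 0 ncols 1).foldl
            (fun st col => (st.1 + 1, st.2.insert st.1 [row, col])) st)
        (0, PySem.Dict.empty)).2.items =
      (PySem.List.pyRange 0 ((n : Int) * ncols) 1).map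
        (fun idx => (idx, [PySem.Int.floordiv idx ncols, PySem.Int.mod idx ncols])) ∧
    (∀ k : Int, (n : Int) * ncols ≤ k →
      ((PySem.List.pyRange 0 (n : Int) 1).foldl
        (fun (st : Int × PySem.Dict Int (List Int)) row =>
          (PySem.List.pyRange 0 ncols 1).foldl
            (fun st col => (st.1 + 1, st.2.insert st.1 [row, col])) st)
        (0, PySem.Dict.empty)).2.contains k = false) := by
  induction n with
  | zero =>
    simp
    rfl
  | succ n ih =>
    have hsplit : PySem.List.pyRange 0 ((n : Int) + 1) 1 =
        PySem.List.pyRange 0 (n : Int) 1 ++ [(n : Int)] :=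
      PySem.List.pyRange_one_succ_right (by omega)
    obtain ⟨h1, h2, h3⟩ := ih
    have hcn : PySem.List.pyRange 0 ncols 1 = PySem.List.pyRange 0 ((ncols.toNat : Nat) : Int) 1 := by
      rw [Int.toNat_of_nonneg (by omega)]
    rw [hcn] at h1 h2 h3 ⊢
    push_cast
    rw [hsplit, List.foldl_append]
    simp only [List.foldl_cons, List.foldl_nil]
    -- the final inner loop, starting at counter n*ncols
    have hst : ((PySem.List.pyRange 0 (n : Int) 1).foldl
        (fun (st : Int × PySem.Dict Int (List Int)) row =>
          (PySem.List.pyRange 0 ((ncols.toNat : Nat) : Int) 1).foldl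
            (fun st col => (st.1 + 1, st.2.insert st.1 [row, col])) st)
        (0, PySem.Dict.empty)) = (((PySem.List.pyRange 0 (n : Int) 1).foldl
        (fun (st : Int × PySem.Dict Int (List Int)) row =>
          (PySem.List.pyRange 0 ((ncols.toNat : Nat) : Int) 1).foldl
            (fun st col => (st.1 + 1, st.2.insert st.1 [row, col])) st)
        (0, PySem.Dict.empty)).1, ((PySem.List.pyRange 0 (n : Int) 1).foldl
        (fun (st : Int × PySem.Dict Int (List Int)) row =>
          (PySem.List.pyRange 0 ((ncols.toNat : Nat) : Int) 1).foldl
            (fun st col => (st.1 + 1, st.2.insert st.1 [row, col])) st)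
        (0, PySem.Dict.empty)).2) := rfl
    rw [hst, h1]
    have hinner := innerA (n : Int) ((n : Int) * ncols) _ (fun k hk => h3 k hk) ncols.toNat
    obtain ⟨g1, g2, g3⟩ := hinner
    have htn : ((ncols.toNat : Nat) : Int) = ncols := Int.toNat_of_nonneg (by omega)
    refine ⟨?_, ?_, ?_⟩
    · rw [g1, htn]; ring
    · rw [g2, h2]
      have hmerge : PySem.List.pyRange 0 (((n:Int) + 1) * ncols) 1 =
          PySem.List.pyRange 0 ((n:Int) * ncols) 1 ++
          PySem.List.pyRange ((n:Int) * ncols) (((n:Int) + 1) * ncols) 1 := by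
        apply PySem.List.pyRange_one_append
        · positivity
        · nlinarith
      rw [hmerge, List.map_append]
      congr 1
      -- the freshly inserted pairs are B's closed-form pairs for the new index block
      rw [htn]
      rw [PySem.List.pyRange_one, PySem.List.pyRange_one]
      rw [List.map_map, List.map_map]
      have hlen : (ncols - 0).toNat = (((n:Int) + 1) * ncols - (n:Int) * ncols).toNat := by
        congr 1; ring
      rw [hlen]
      apply List.map_congr_left
      intro k hk
      simp only [List.mem_range] at hk
      have hkc : (k : Int) < ncols := by
        have : (((n:Int) + 1) * ncols - (n:Int) * ncols) = ncols := by ring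
        omega
      have hfd : PySem.Int.floordiv ((n:Int) * ncols + (k:Int)) ncols = (n : Int) := by
        rw [PySem.Int.floordiv_eq_iff_of_pos hc]
        constructor <;> nlinarith
      have hmd : PySem.Int.mod ((n:Int) * ncols + (k:Int)) ncols = (k : Int) := by
        have h9 := PySem.Int.floordiv_mul_add_mod ((n:Int) * ncols + (k:Int)) ncols
        rw [hfd] at h9
        omega
      simp [Function.comp, hfd, hmd]
    · intro k hk
      apply g3
      rw [htn]
      nlinarith [hk]

-- B's flat loop over fresh distinct keys just appends its pairs.
theorem altB_items (nrows ncols : Int) (h1 : 0 < nrows) (h2 : 0 < ncols) :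
    get_dict_subplots_alt nrows ncols =
      (PySem.List.pyRange 0 (nrows * ncols) 1).map
        (fun i => (i, [PySem.Int.floordiv i ncols, PySem.Int.mod i ncols])) := by
  unfold get_dict_subplots_alt
  rw [if_neg (by rintro (h | h) <;> omega)]
  have h := PySem.Dict.items_foldl_insert_fresh
      (PySem.List.pyRange 0 (nrows * ncols) 1) (fun i => i)
      (fun i => [PySem.Int.floordiv i ncols, PySem.Int.mod i ncols]) PySem.Dict.empty
      (fun a _ => PySem.Dict.contains_empty a)
      (by simpa using PySem.List.nodup_pyRange_one 0 (nrows * ncols))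
  simpa using h

-- ===== VERDICT (by name: the statement is the Claim_ definition above) =====
theorem get_dict_subplots_spec : Claim_equal_get_dict_subplots := by
  intro nrows ncols _
  unfold Spec_get_dict_subplots
  by_cases hr : nrows ≤ 0
  · -- no rows: A's outer range is empty, B returns []
    unfold get_dict_subplots get_dict_subplots_alt
    rw [PySem.List.pyRange_one_eq_nil (a := 0) (b := nrows) hr, if_pos (Or.inl hr)]
    rfl
  · by_cases hcle : ncols ≤ 0
    · -- no columns: A's inner loop is the identity, B returns []
      unfold get_dict_subplots get_dict_subplots_alt
      simp only [PySem.List.pyRange_one_eq_nil (a := 0) (b := ncols) hcle, List.foldl_nil]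
      rw [foldl_id, if_pos (Or.inr hcle)]
      rfl
    · have hr' : 0 < nrows := by omega
      have hc' : 0 < ncols := by omega
      have hn : nrows = (nrows.toNat : Int) := (Int.toNat_of_nonneg (by omega)).symm
      unfold get_dict_subplots
      rw [altB_items nrows ncols hr' hc', hn]
      exact (outerA ncols hc' nrows.toNat).2.1
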